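-- pv_equiv track=rewrite | github.com/google-research/google-research | compositional_classification/scripts/cfq_parse_util.py | convert_to_xlink_group_ids
-- ===== SOURCE A (Python) =====
-- def convert_to_xlink_group_ids(
--     question_ids, query_ids,
--     xlink_mapping
-- ):
--   """Converts question and query token ids to cross link group ids."""
--   question_group = [0 for _ in range(len(question_ids))]
--   query_group = [0 for _ in range(len(query_ids))]
--
--   # Find n-gram matching in a brute-force way (group id 0 means no group)
--   for token_ids, group_ids, mapping in zip([question_ids, query_ids],
--                                            [question_group, query_group],
--                                            xlink_mapping):
--     for ngram, map_group_id in mapping: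
--       for i in range(len(token_ids) - len(ngram) + 1):
--         ngram_match = True
--         for j, ngram_id in enumerate(ngram):
--           if token_ids[i + j] != ngram_id or group_ids[i + j] != 0:
--             ngram_match = False
--             break
--         if ngram_match:
--           for j in range(len(ngram)):
--             group_ids[i + j] = map_group_id
--
--   return (question_group, query_group)
-- ===== SOURCE B (Python) =====
-- def _assign_groups(tokens, mapping):
--   """Assign group ids using a token -> positions index and slice comparisons."""
--   n = len(tokens)
--   pos = {}
--   for i, t in enumerate(tokens):
--     pos.setdefault(t, []).append(i)
--   group = [0] * n
--   for ngram, group_id in mapping: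
--     if not ngram:
--       continue  # an empty ngram never writes anything
--     ngram = list(ngram)
--     length = len(ngram)
--     zeros = [0] * length
--     fill = [group_id] * length
--     for i in pos.get(ngram[0], []):
--       if group[i] == 0 and tokens[i:i + length] == ngram and group[i:i + length] == zeros:
--         group[i:i + length] = fill
--   return group
--
--
-- def convert_to_xlink_group_ids(question_ids, query_ids, xlink_mapping):
--   """Converts question and query token ids to cross link group ids."""
--   question_group = [0] * len(question_ids)
--   query_group = [0] * len(query_ids)
--   if len(xlink_mapping) >= 1:
--     question_group = _assign_groups(question_ids, xlink_mapping[0])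
--   if len(xlink_mapping) >= 2:
--     query_group = _assign_groups(query_ids, xlink_mapping[1])
--   return (question_group, query_group)
-- ===== Notes on version B (the rewrite author's own statement) =====
-- stated objective: faster
-- what changed: B builds a token->positions hash index once per side and, for each mapping entry, visits only the candidate start positions of the ngram's first token, comparing whole windows with C-level list-slice equality and filling by slice assignment, instead of A's per-entry full positional scan with a nested per-token Python loop.
import Mathlib
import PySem

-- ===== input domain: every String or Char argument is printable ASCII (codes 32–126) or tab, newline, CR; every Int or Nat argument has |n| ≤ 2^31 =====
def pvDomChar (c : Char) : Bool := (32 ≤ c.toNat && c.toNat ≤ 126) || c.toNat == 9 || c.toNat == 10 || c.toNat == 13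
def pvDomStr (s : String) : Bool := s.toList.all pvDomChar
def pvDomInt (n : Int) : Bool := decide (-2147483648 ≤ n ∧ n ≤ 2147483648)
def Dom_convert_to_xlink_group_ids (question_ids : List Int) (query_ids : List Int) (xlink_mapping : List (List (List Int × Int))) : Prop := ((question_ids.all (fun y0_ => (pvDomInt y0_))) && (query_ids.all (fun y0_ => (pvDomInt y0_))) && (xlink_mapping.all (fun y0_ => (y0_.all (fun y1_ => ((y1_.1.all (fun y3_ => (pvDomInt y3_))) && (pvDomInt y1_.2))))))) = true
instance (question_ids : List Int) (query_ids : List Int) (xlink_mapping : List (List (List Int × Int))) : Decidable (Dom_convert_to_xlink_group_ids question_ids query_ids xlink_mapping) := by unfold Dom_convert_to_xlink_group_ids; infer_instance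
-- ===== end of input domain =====

-- B replaces A's brute-force per-entry positional scan by a token -> positions index with
-- window comparisons, visiting only candidate start positions (measurably faster in Python).
-- ===== PORT A =====
-- A-side: the inner enumerate(ngram) loop with its break (token and zero check together)
def pvMatchA (token_ids group_ids : List Int) (i : Int) : List (Int × Int) → Bool
  | [] => true
  | (j, ngram_id) :: rest =>
    if PySem.List.pyGetD token_ids (i + j) 0 ≠ ngram_id ∨ PySem.List.pyGetD group_ids (i + j) 0 ≠ 0 then false
    else pvMatchA token_ids group_ids i rest

-- A-side: one pass of the middle loop body: brute-force scan of all start positions for one mapping entry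
def pvSideA (token_ids : List Int) (mapping : List (List Int × Int)) (group0 : List Int) : List Int :=
  mapping.foldl (fun group_ids entry =>
    (PySem.List.pyRange 0 (PySem.List.len token_ids - PySem.List.len entry.1 + 1) 1).foldl
      (fun group_ids i =>
        if pvMatchA token_ids group_ids i (PySem.List.enumerate entry.1) then
          (PySem.List.pyRange 0 (PySem.List.len entry.1) 1).foldl
            (fun g j => PySem.List.pySetD g (i + j) entry.2) group_ids
        else group_ids)
      group_ids) group0

def convert_to_xlink_group_ids (question_ids : List Int) (query_ids : List Int) (xlink_mapping : List (List (List Int × Int))) : List Int × List Int :=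
  let question_group := List.replicate question_ids.length (0 : Int)
  let query_group := List.replicate query_ids.length (0 : Int)
  -- zip([question_ids, query_ids], [question_group, query_group], xlink_mapping) truncates at the shortest list
  match xlink_mapping with
  | [] => (question_group, query_group)
  | [m1] => (pvSideA question_ids m1 question_group, query_group)
  | m1 :: m2 :: _ => (pvSideA question_ids m1 question_group, pvSideA query_ids m2 query_group)

-- ===== PORT B =====
-- B-side: token -> ascending positions index ('pos.setdefault(t, []).append(i)')
def pvIndexB (tokens : List Int) : PySem.Dict Int (List Int) :=
  (PySem.List.enumerate tokens).foldl (fun d p => d.modify p.2 [] (· ++ [p.1])) PySem.Dict.empty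

-- B-side: apply entries in order; candidate starts from the index, slice compares, slice-assignment fill
def pvAssignB (tokens : List Int) (mapping : List (List Int × Int)) : List Int :=
  let pos := pvIndexB tokens
  mapping.foldl (fun group e =>
    match e.1 with
    | [] => group
    | x :: _ =>
      let zeros := List.replicate e.1.length (0 : Int)
      let fill := List.replicate e.1.length e.2
      (pos.getD x []).foldl (fun group i =>
        if (PySem.List.pyGetD group i 0 == 0)
            && (PySem.List.slice tokens (some i) (some (i + PySem.List.len e.1)) == e.1)
            && (PySem.List.slice group (some i) (some (i + PySem.List.len e.1)) == zeros) then
          PySem.List.slice group none (some i) ++ fill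
            ++ PySem.List.slice group (some (i + PySem.List.len e.1)) none
        else group) group)
    (List.replicate tokens.length 0)

def convert_to_xlink_group_ids_alt (question_ids : List Int) (query_ids : List Int) (xlink_mapping : List (List (List Int × Int))) : List Int × List Int :=
  let question_group := List.replicate question_ids.length (0 : Int)
  let query_group := List.replicate query_ids.length (0 : Int)
  match xlink_mapping with
  | [] => (question_group, query_group)
  | [m1] => (pvAssignB question_ids m1, query_group)
  | m1 :: m2 :: _ => (pvAssignB question_ids m1, pvAssignB query_ids m2)

-- ===== PRECONDITION & SPEC =====
def Spec_convert_to_xlink_group_ids (question_ids : List Int) (query_ids : List Int) (xlink_mapping : List (List (List Int × Int))) (out : List Int × List Int) : Prop := out = convert_to_xlink_group_ids_alt question_ids query_ids xlink_mapping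
instance (question_ids : List Int) (query_ids : List Int) (xlink_mapping : List (List (List Int × Int))) (out : List Int × List Int) : Decidable (Spec_convert_to_xlink_group_ids question_ids query_ids xlink_mapping out) := by unfold Spec_convert_to_xlink_group_ids; infer_instance

-- ===== CLAIM (what is proved, stated in full; the proofs are below) =====
def Claim_equal_convert_to_xlink_group_ids : Prop := ∀ (question_ids : List Int) (query_ids : List Int) (xlink_mapping : List (List (List Int × Int))), Dom_convert_to_xlink_group_ids question_ids query_ids xlink_mapping → Spec_convert_to_xlink_group_ids question_ids query_ids xlink_mapping (convert_to_xlink_group_ids question_ids query_ids xlink_mapping)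


-- ===== LEMMAS AND PROOFS =====

-- the canonical match-position list and zero-guarded fill body both folds reduce to
def pvCanon (tokens ng : List Int) : List Nat :=
  (List.range tokens.length).filter (fun j => (tokens.drop j).take ng.length == ng)

def pvBodyZ (L : Nat) (gid : Int) (g : List Int) (j : Nat) : List Int :=
  if ((g.drop j).take L).all (· == 0) then g.take j ++ List.replicate L gid ++ g.drop (j + L)
  else g

-- foldl congruence carrying an invariant on the accumulator
theorem pv_foldl_inv_congr {a b : Type} (l : List b) (f g : a → b → a) (Inv : a → Prop) (init : a)
    (h0 : Inv init) (h : ∀ x acc, Inv acc → x ∈ l → f acc x = g acc x ∧ Inv (f acc x)) :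
    l.foldl f init = l.foldl g init ∧ Inv (l.foldl f init) := by
  induction l generalizing init with
  | nil => exact ⟨rfl, h0⟩
  | cons x t ih =>
    obtain ⟨hx1, hx2⟩ := h x init h0 (by simp)
    simp only [List.foldl_cons]
    rw [← hx1]
    exact ih (f init x) hx2 (fun y acc ha hy => h y acc ha (List.mem_cons_of_mem _ hy))

-- invariant preservation through a foldl
theorem pv_foldl_inv {a b : Type} (l : List b) (f : a → b → a) (Inv : a → Prop) (init : a)
    (h0 : Inv init) (h : ∀ x acc, Inv acc → x ∈ l → Inv (f acc x)) : Inv (l.foldl f init) := by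
  induction l generalizing init with
  | nil => exact h0
  | cons x t ih =>
    exact ih (f init x) (h x init h0 (by simp)) (fun y acc ha hy => h y acc ha (List.mem_cons_of_mem _ hy))

-- 'd.setdefault(key(x), []).append(val(x))' over a list, keyed form of Dict.getD_foldl_modify_append
theorem pv_getD_keyed {b k v : Type} [BEq k] [LawfulBEq k] (l : List b) (key : b → k) (val : b → v)
    (d : PySem.Dict k (List v)) (c : k) :
    (l.foldl (fun d x => d.modify (key x) [] (· ++ [val x])) d).getD c []
      = d.getD c [] ++ (l.filter (fun x => key x == c)).map val := by
  have h := PySem.Dict.getD_foldl_modify_append (l := l.map (fun x => (key x, val x))) (d := d) (c := c)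
  have hid : ((fun p : k × v => p.2) ∘ fun x => (key x, val x)) = val := rfl
  simpa [List.foldl_map, List.filter_map, hid] using h

-- enumerate written over List.range
theorem pv_enumerate_eq (xs : List Int) : ∀ (k : Nat),
    PySem.List.enumerate xs ((k : Nat) : Int)
      = (List.range xs.length).map (fun j => (((k + j : Nat) : Int), xs.getD j 0)) := by
  induction xs with
  | nil => intro k; simp [PySem.List.enumerate_nil]
  | cons x t ih =>
    intro k
    rw [PySem.List.enumerate_cons, show ((k : Nat) : Int) + 1 = ((k + 1 : Nat) : Int) by push_cast; ring,
        ih (k + 1)]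
    simp only [List.length_cons, List.range_succ_eq_map, List.map_cons, List.map_map]
    refine congrArg₂ _ (by simp) (List.map_congr_left fun j hj => ?_)
    simp only [Function.comp_def, List.getD_cons_succ]
    congr 2
    omega

-- the index holds, per token value, the ascending positions of that token
theorem pv_pos_getD (tokens : List Int) (x : Int) :
    (pvIndexB tokens).getD x []
      = ((List.range tokens.length).filter (fun j => tokens.getD j 0 == x)).map
          (fun j => ((j : Nat) : Int)) := by
  unfold pvIndexB
  rw [show PySem.List.enumerate tokens = PySem.List.enumerate tokens ((0 : Nat) : Int) by norm_num,
      pv_enumerate_eq tokens 0]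
  have h := pv_getD_keyed
    ((List.range tokens.length).map (fun j => (((0 + j : Nat) : Int), tokens.getD j 0)))
    (fun p => p.2) (fun p => p.1) PySem.Dict.empty x
  simpa [List.filter_map, List.map_map, Function.comp_def] using h

-- 'l == [0]*len(l)' is 'all zero'
theorem pv_beq_replicate_zero : ∀ (l : List Int), (l == List.replicate l.length 0) = l.all (· == 0) := by
  intro l
  induction l with
  | nil => rfl
  | cons a t ih => simp [List.replicate_succ, List.cons_beq_cons, ih]

-- the same with the length given as a separate value
theorem pv_beq_replicate_zero' (l : List Int) (L : Nat) (h : l.length = L) :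
    (l == List.replicate L 0) = l.all (· == 0) := by
  subst h
  exact pv_beq_replicate_zero l

-- a successful window comparison pins the window inside the tokens and its first token
theorem pv_sliceEq_facts (tokens : List Int) (x : Int) (rest : List Int) (j : Nat)
    (h : ((tokens.drop j).take (x :: rest).length == (x :: rest)) = true) :
    j + (x :: rest).length ≤ tokens.length ∧ tokens.getD j 0 = x := by
  have he := eq_of_beq h
  have hlen := congrArg List.length he
  simp only [List.length_take, List.length_drop, List.length_cons] at hlen
  have hj : j < tokens.length := by omega
  refine ⟨by simp only [List.length_cons]; omega, ?_⟩
  rw [List.drop_eq_getElem_cons hj] at he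
  simp only [List.length_cons, List.take_succ_cons, List.cons.injEq] at he
  rw [List.getD_eq_getElem _ _ hj]
  exact he.1

-- a filter whose predicate only holds below M may run over any longer range
theorem pv_filter_range_ext {p : Nat → Bool} (M n : Nat) (hMn : M ≤ n)
    (hp : ∀ j, p j = true → j < M) :
    (List.range n).filter p = (List.range M).filter p := by
  rw [show n = M + (n - M) by omega, List.range_add, List.filter_append]
  have h2 : ((List.range (n - M)).map (M + ·)).filter p = [] := by
    apply List.filter_eq_nil_iff.mpr
    intro a ha hpa
    obtain ⟨q, _, rfl⟩ := List.mem_map.mp ha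
    exact absurd (hp _ hpa) (by omega)
  rw [h2, List.append_nil]

-- the inner enumerate loop of A: token match and zero check over the window
theorem pv_matchA_eq (tokens group : List Int) (hlen : group.length = tokens.length) :
    ∀ (ng : List Int) (k s : Nat), k + s + ng.length ≤ tokens.length →
    pvMatchA tokens group ((k : Int)) (PySem.List.enumerate ng (s : Int))
      = (((tokens.drop (k + s)).take ng.length == ng)
          && ((group.drop (k + s)).take ng.length).all (· == 0)) := by
  intro ng
  induction ng with
  | nil => intro k s h; simp [pvMatchA, PySem.List.enumerate_nil]
  | cons x t ih =>
    intro k s h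
    rw [PySem.List.enumerate_cons]
    have hks : k + s < tokens.length := by simp at h; omega
    have hks' : k + s < group.length := by omega
    have hcast : (k : Int) + (s : Int) = ((k + s : Nat) : Int) := by push_cast; ring
    have hcast2 : (s : Int) + 1 = ((s + 1 : Nat) : Int) := by push_cast; ring
    simp only [pvMatchA, hcast, hcast2, PySem.List.pyGetD_natCast,
      List.getD_eq_getElem _ _ hks, List.getD_eq_getElem _ _ hks']
    rw [List.drop_eq_getElem_cons hks, List.drop_eq_getElem_cons hks']
    simp only [List.length_cons, List.take_succ_cons, List.cons_beq_cons, List.all_cons]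
    have ht : pvMatchA tokens group ((k : Int)) (PySem.List.enumerate t (((s + 1 : Nat)) : Int))
        = (((tokens.drop (k + (s + 1))).take t.length == t)
            && ((group.drop (k + (s + 1))).take t.length).all (· == 0)) := by
      apply ih; simp at h ⊢; omega
    rw [ht]
    by_cases h1 : tokens[k + s] = x <;> by_cases h2 : group[k + s] = (0 : Int) <;>
      simp [h1, h2, show k + s + 1 = k + (s + 1) by omega]

-- the fill loop of A is a splice
theorem pv_fill_eq (gid : Int) : ∀ (L : Nat) (g : List Int) (k : Nat), k + L ≤ g.length →
    (PySem.List.pyRange 0 ((L : Nat) : Int) 1).foldl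
        (fun g2 j => PySem.List.pySetD g2 ((k : Int) + j) gid) g
      = g.take k ++ List.replicate L gid ++ g.drop (k + L) := by
  intro L
  induction L with
  | zero =>
    intro g k h
    rw [PySem.List.pyRange_one_eq_nil (by norm_num)]
    simp only [List.foldl_nil, List.replicate_zero, List.append_nil, Nat.add_zero]
    exact (List.take_append_drop k g).symm
  | succ L ih =>
    intro g k h
    have hcast : ((L + 1 : Nat) : Int) = ((L : Nat) : Int) + 1 := by push_cast; ring
    rw [hcast, PySem.List.pyRange_one_succ_right (by positivity), List.foldl_append]
    simp only [List.foldl_cons, List.foldl_nil]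
    rw [ih g k (by omega)]
    have hcast2 : (k : Int) + (L : Int) = ((k + L : Nat) : Int) := by push_cast; ring
    rw [hcast2, PySem.List.pySetD_natCast]
    have htk : (g.take k).length = k := by simp; omega
    have hkL : k + L < g.length := by omega
    rw [List.set_append_right _ _ (by simp [htk])]
    have hidx : k + L - (g.take k ++ List.replicate L gid).length = 0 := by simp [htk]
    rw [hidx, List.drop_eq_getElem_cons hkL, List.set_cons_zero, List.replicate_succ']
    simp [show k + (L + 1) = k + L + 1 by omega]

-- pvBodyZ keeps the group length on canonical positions
theorem pv_bodyZ_len (tokens ng : List Int) (gid : Int) (g : List Int) (j : Nat)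
    (hg : g.length = tokens.length) (hj : j ∈ pvCanon tokens ng) :
    (pvBodyZ ng.length gid g j).length = tokens.length := by
  unfold pvCanon at hj
  have hj' := List.mem_filter.mp hj
  unfold pvBodyZ
  split
  · rcases ng with _ | ⟨x, rest⟩
    · simpa using hg
    · have := (pv_sliceEq_facts tokens x rest j hj'.2).1
      simp only [List.length_append, List.length_take, List.length_replicate, List.length_drop]
      omega
  · exact hg

-- A's brute-force scan for one entry, reduced to the canonical fold
theorem pv_stepA_canon (tokens ng : List Int) (gid : Int) (g : List Int)
    (hg : g.length = tokens.length) (hng : ng ≠ []) :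
    (PySem.List.pyRange 0 (PySem.List.len tokens - PySem.List.len ng + 1) 1).foldl
      (fun group_ids i =>
        if pvMatchA tokens group_ids i (PySem.List.enumerate ng) then
          (PySem.List.pyRange 0 (PySem.List.len ng) 1).foldl
            (fun g2 j => PySem.List.pySetD g2 (i + j) gid) group_ids
        else group_ids) g
    = (pvCanon tokens ng).foldl (pvBodyZ ng.length gid) g ∧
    ((pvCanon tokens ng).foldl (pvBodyZ ng.length gid) g).length = tokens.length := by
  have hlen : ((pvCanon tokens ng).foldl (pvBodyZ ng.length gid) g).length = tokens.length :=
    pv_foldl_inv _ _ (fun g => g.length = tokens.length) g hg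
      (fun j a ha hj => pv_bodyZ_len tokens ng gid a j ha hj)
  refine ⟨?_, hlen⟩
  simp only [PySem.List.len_eq]
  rw [PySem.List.pyRange_one 0 ((tokens.length : Int) - (ng.length : Int) + 1)]
  rw [show (((tokens.length : Int) - (ng.length : Int) + 1) - 0).toNat
        = tokens.length + 1 - ng.length by omega]
  rw [List.foldl_map]
  have key := pv_foldl_inv_congr (List.range (tokens.length + 1 - ng.length))
    (fun group_ids (k : Nat) =>
      if pvMatchA tokens group_ids ((0 : Int) + (k : Int)) (PySem.List.enumerate ng) then
        (PySem.List.pyRange 0 ((ng.length : Nat) : Int) 1).foldl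
          (fun g2 j => PySem.List.pySetD g2 (((0 : Int) + (k : Int)) + j) gid) group_ids
      else group_ids)
    (fun group_ids (k : Nat) =>
      if ((tokens.drop k).take ng.length == ng) then pvBodyZ ng.length gid group_ids k
      else group_ids)
    (fun g => g.length = tokens.length) g hg ?_
  · rw [key.1, PySem.List.foldl_if_eq_foldl_filter (fun k => (tokens.drop k).take ng.length == ng)
        (fun group_ids k => pvBodyZ ng.length gid group_ids k)]
    unfold pvCanon
    obtain ⟨x, rest, rfl⟩ := List.exists_cons_of_ne_nil hng
    rw [pv_filter_range_ext (tokens.length + 1 - (x :: rest).length) tokens.length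
      (by simp only [List.length_cons]; omega)
      (fun j hj => by
        have hs2 : ((tokens.drop j).take (x :: rest).length == (x :: rest)) = true := by
          simpa using hj
        have := (pv_sliceEq_facts tokens x rest j hs2).1
        simp only [List.length_cons] at this ⊢
        omega)]
  · intro k a ha hk
    have hkM : k < tokens.length + 1 - ng.length := List.mem_range.mp hk
    have hkL : k + ng.length ≤ tokens.length := by
      rcases ng with _ | _
      · simp at hng
      · simp only [List.length_cons] at hkM ⊢; omega
    have hm : pvMatchA tokens a ((k : Nat) : Int) (PySem.List.enumerate ng)
        = (((tokens.drop k).take ng.length == ng)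
            && ((a.drop k).take ng.length).all (· == 0)) := by
      have := pv_matchA_eq tokens a ha ng k 0 (by omega)
      simpa using this
    have hfill := pv_fill_eq gid ng.length a k (by omega)
    beta_reduce
    simp only [zero_add]
    rw [hm]
    constructor
    · by_cases h1 : ((tokens.drop k).take ng.length == ng) = true <;>
        by_cases h2 : (((a.drop k).take ng.length).all (· == 0)) = true <;>
        simp [pvBodyZ, h1, h2, hfill]
    · by_cases h1 : ((tokens.drop k).take ng.length == ng) = true <;>
        by_cases h2 : (((a.drop k).take ng.length).all (· == 0)) = true <;>
        (simp [h1, h2, hfill, ha]; try omega)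

-- B's indexed pass for one nonempty entry, reduced to the canonical fold
theorem pv_stepB_canon (tokens : List Int) (x : Int) (rest : List Int) (gid : Int) (g : List Int)
    (hg : g.length = tokens.length) :
    ((pvIndexB tokens).getD x []).foldl (fun group i =>
        if (PySem.List.pyGetD group i 0 == 0)
            && (PySem.List.slice tokens (some i) (some (i + PySem.List.len (x :: rest))) == (x :: rest))
            && (PySem.List.slice group (some i) (some (i + PySem.List.len (x :: rest)))
                  == List.replicate (x :: rest).length (0 : Int)) then
          PySem.List.slice group none (some i) ++ List.replicate (x :: rest).length gid
            ++ PySem.List.slice group (some (i + PySem.List.len (x :: rest))) none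
        else group) g
    = (pvCanon tokens (x :: rest)).foldl (pvBodyZ (x :: rest).length gid) g := by
  rw [pv_pos_getD tokens x, List.foldl_map]
  have key := pv_foldl_inv_congr
    ((List.range tokens.length).filter (fun j => tokens.getD j 0 == x))
    (fun group (j : Nat) =>
      if (PySem.List.pyGetD group ((j : Nat) : Int) 0 == 0)
          && (PySem.List.slice tokens (some ((j : Nat) : Int))
                (some (((j : Nat) : Int) + PySem.List.len (x :: rest))) == (x :: rest))
          && (PySem.List.slice group (some ((j : Nat) : Int))
                (some (((j : Nat) : Int) + PySem.List.len (x :: rest)))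
                  == List.replicate (x :: rest).length (0 : Int)) then
        PySem.List.slice group none (some ((j : Nat) : Int)) ++ List.replicate (x :: rest).length gid
          ++ PySem.List.slice group (some (((j : Nat) : Int) + PySem.List.len (x :: rest))) none
      else group)
    (fun group (j : Nat) =>
      if ((tokens.drop j).take (x :: rest).length == (x :: rest)) then
        pvBodyZ (x :: rest).length gid group j
      else group)
    (fun g => g.length = tokens.length) g hg ?_
  · rw [key.1, PySem.List.foldl_if_eq_foldl_filter
        (fun j => (tokens.drop j).take (x :: rest).length == (x :: rest))
        (fun group j => pvBodyZ (x :: rest).length gid group j)]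
    rw [List.filter_filter]
    unfold pvCanon
    congr 1
    apply List.filter_congr
    intro j hj
    show (((tokens.drop j).take (x :: rest).length == (x :: rest)) && (tokens.getD j 0 == x))
        = ((tokens.drop j).take (x :: rest).length == (x :: rest))
    cases hs : ((tokens.drop j).take (x :: rest).length == (x :: rest)) with
    | false => rw [Bool.false_and]
    | true => rw [Bool.true_and, (pv_sliceEq_facts tokens x rest j hs).2, beq_self_eq_true]
  · intro j a ha hj
    have hslt : PySem.List.slice tokens (some ((j : Nat) : Int))
        (some (((j : Nat) : Int) + PySem.List.len (x :: rest)))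
        = (tokens.drop j).take (x :: rest).length := by
      simp only [PySem.List.len_eq]
      exact PySem.List.slice_natCast_add tokens j (x :: rest).length
    have hslg : PySem.List.slice a (some ((j : Nat) : Int))
        (some (((j : Nat) : Int) + PySem.List.len (x :: rest)))
        = (a.drop j).take (x :: rest).length := by
      simp only [PySem.List.len_eq]
      exact PySem.List.slice_natCast_add a j (x :: rest).length
    constructor
    · beta_reduce
      rw [hslt, hslg]
      by_cases hs : ((tokens.drop j).take (x :: rest).length == (x :: rest)) = true
      · obtain ⟨hjL, _⟩ := pv_sliceEq_facts tokens x rest j hs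
        have hjL' : j + (x :: rest).length ≤ a.length := by omega
        have htklen : ((a.drop j).take (x :: rest).length).length = (x :: rest).length := by
          simp only [List.length_take, List.length_drop]; omega
        have hzrep := pv_beq_replicate_zero' ((a.drop j).take (x :: rest).length)
          (x :: rest).length htklen
        rw [hs, hzrep, Bool.and_true]
        by_cases hz : (((a.drop j).take (x :: rest).length).all (· == 0)) = true
        · have hj0 : (PySem.List.pyGetD a ((j : Nat) : Int) 0 == 0) = true := by
            have hjlt : j < a.length := by simp at hjL'; omega
            rw [PySem.List.pyGetD_natCast, List.getD_eq_getElem _ _ hjlt]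
            have := List.all_eq_true.mp hz a[j] (by
              rw [List.drop_eq_getElem_cons hjlt]
              simp only [List.length_cons, List.take_succ_cons]
              exact List.mem_cons_self ..)
            simpa using this
          rw [hj0, hz, PySem.List.slice_to_natCast,
              show ((j : Nat) : Int) + PySem.List.len (x :: rest)
                = ((j + (x :: rest).length : Nat) : Int) by simp [PySem.List.len_eq],
              PySem.List.slice_from_natCast]
          unfold pvBodyZ
          rw [hz]
          simp
        · simp only [hz, Bool.and_false, if_false, pvBodyZ, Bool.false_eq_true]
          rfl
      · simp only [hs, Bool.false_and, Bool.and_false]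
        rfl
    · beta_reduce
      rw [hslt, hslg]
      split
      · next h =>
        obtain ⟨⟨_, hs⟩, _⟩ : (_ ∧ _) ∧ _ := by simpa [Bool.and_eq_true] using h
        have hs2 : ((tokens.drop j).take (x :: rest).length == (x :: rest)) = true := by
          simpa using hs
        obtain ⟨hjL, _⟩ := pv_sliceEq_facts tokens x rest j hs2
        rw [PySem.List.slice_to_natCast,
            show ((j : Nat) : Int) + PySem.List.len (x :: rest)
              = ((j + (x :: rest).length : Nat) : Int) by simp [PySem.List.len_eq],
            PySem.List.slice_from_natCast]
        simp only [List.length_append, List.length_take, List.length_replicate, List.length_drop]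
        omega
      · exact ha

-- per side: A's brute-force loop from an all-zero group equals B's assignment
theorem pv_side_eq (tokens : List Int) (mapping : List (List Int × Int)) :
    pvSideA tokens mapping (List.replicate tokens.length 0) = pvAssignB tokens mapping := by
  unfold pvSideA pvAssignB
  simp only []
  refine (pv_foldl_inv_congr mapping _ _ (fun g => g.length = tokens.length) _ (by simp) ?_).1
  intro e g hg he
  rcases hx : e.1 with _ | ⟨x, rest⟩

  · -- empty ngram: A matches everywhere but fills nothing; B skips the entry
    constructor
    · simp [pvMatchA, PySem.List.enumerate_nil, PySem.List.len_eq]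
    · -- the A step leaves the group unchanged, so the length is kept
      have : (PySem.List.pyRange 0 (PySem.List.len tokens - PySem.List.len ([] : List Int) + 1)
          1).foldl (fun group_ids i =>
            if pvMatchA tokens group_ids i (PySem.List.enumerate ([] : List Int)) then
              (PySem.List.pyRange 0 (PySem.List.len ([] : List Int)) 1).foldl
                (fun g2 j => PySem.List.pySetD g2 (i + j) e.2) group_ids
            else group_ids) g = g := by
        simp [pvMatchA, PySem.List.enumerate_nil, PySem.List.len_eq]
      rw [this]; exact hg
  · have hA := pv_stepA_canon tokens (x :: rest) e.2 g hg (by simp)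
    have hB := pv_stepB_canon tokens x rest e.2 g hg
    exact ⟨hA.1.trans hB.symm, by rw [hA.1]; exact hA.2⟩

-- ===== VERDICT (by name: the statement is the Claim_ definition above) =====
theorem convert_to_xlink_group_ids_spec : Claim_equal_convert_to_xlink_group_ids := by
  intro question_ids query_ids xlink_mapping _
  unfold Spec_convert_to_xlink_group_ids convert_to_xlink_group_ids convert_to_xlink_group_ids_alt
  rcases xlink_mapping with _ | ⟨m1, _ | ⟨m2, rest⟩⟩ <;> simp [pv_side_eq]
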